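-- pv_equiv track=rewrite | github.com/BadInfluence69/AdVault-DNS- | DNS_Ad_Blocker.py.py | _best_geo_rule_match
-- ===== SOURCE A (Python) =====
-- def _normalize_domain(domain: str) -> str:
--     d = (domain or "").strip().strip(".").lower()
--     try:
--         d = d.encode("idna").decode("ascii")
--     except Exception:
--         pass
--     return d
--
-- def _best_geo_rule_match(qname: str, rules_dict: dict):
--     q = _normalize_domain(qname)
--     best = None
--     best_len = -1
--     for k in rules_dict.keys():
--         kk = _normalize_domain(k)
--         if q == kk or q.endswith("." + kk):
--             if len(kk) > best_len:
--                 best = kk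
--                 best_len = len(kk)
--     return best
-- ===== SOURCE B (Python) =====
-- def _normalize_domain(domain: str) -> str:
--     d = (domain or "").strip().strip(".").lower()
--     try:
--         d = d.encode("idna").decode("ascii")
--     except Exception:
--         pass
--     return d
--
-- def _best_geo_rule_match(qname: str, rules_dict: dict):
--     q = _normalize_domain(qname)
--     rule_set = {_normalize_domain(k) for k in rules_dict.keys()}
--     cand = q
--     while True:
--         if cand in rule_set:
--             return cand
--         i = cand.find(".")
--         if i == -1:
--             return None
--         cand = cand[i + 1:]
-- ===== Notes on version B (the rewrite author's own statement) =====
-- stated objective: alternative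
-- what changed: Instead of scanning every rule key with an endswith test while tracking the longest match, B builds a set of normalized rule keys once and walks the query's own label-boundary suffixes from longest to shortest, returning the first one found in the set.
import Mathlib
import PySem

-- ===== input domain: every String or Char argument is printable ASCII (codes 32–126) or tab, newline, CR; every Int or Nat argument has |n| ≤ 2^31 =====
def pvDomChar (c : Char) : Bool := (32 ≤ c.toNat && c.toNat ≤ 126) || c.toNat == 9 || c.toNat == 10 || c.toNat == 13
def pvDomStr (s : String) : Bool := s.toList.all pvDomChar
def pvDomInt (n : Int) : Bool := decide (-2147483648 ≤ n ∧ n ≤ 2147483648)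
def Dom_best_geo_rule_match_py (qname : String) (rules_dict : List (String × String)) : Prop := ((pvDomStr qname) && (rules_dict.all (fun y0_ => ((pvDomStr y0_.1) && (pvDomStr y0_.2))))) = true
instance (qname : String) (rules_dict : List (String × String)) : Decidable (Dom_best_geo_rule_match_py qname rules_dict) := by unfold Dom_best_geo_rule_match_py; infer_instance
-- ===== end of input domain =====

-- B replaces A's scan of every rule with an endswith test by a longest-to-shortest walk over the
-- query's own label-boundary suffixes looked up in a set of normalized rule keys (objective: alternative).

-- ===== PORT A =====
-- _normalize_domain: strip whitespace, strip dots, lower.  The idna encode/decode step is the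
-- identity on the printable-ASCII domain (an all-ASCII label is either returned unchanged or the
-- codec raises and the exception is caught), so it is ported as the identity — exact on Dom.
def pvNorm (s : String) : List Char :=
  PySem.Chars.lower (PySem.Chars.stripChars (PySem.Chars.strip s.toList) ['.'])

-- rules_dict.keys(): the dict's keys in insertion order = first occurrences of the key column
def best_geo_rule_match_py (qname : String) (rules_dict : List (String × String)) : Option String :=
  let q := pvNorm qname
  let r := (PySem.List.dedup (rules_dict.map (fun kv => kv.1))).foldl
    (fun (st : Option (List Char) × Int) k =>
      let kk := pvNorm k
      if q == kk || PySem.Chars.endswith q ('.' :: kk) then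
        if (kk.length : Int) > st.2 then (some kk, (kk.length : Int)) else st
      else st)
    (none, -1)
  r.1.map (fun l => String.ofList l)

-- ===== PORT B =====
-- the while loop of Source B: return cand if it is in the set, else peel the leading label
-- (cand = cand[i+1:] with i = cand.find("."), inlined; i + 1 ≥ 1 so the slice is List.drop)
def pvAltGo (S : PySem.Set (List Char)) (cand : List Char) : Option (List Char) :=
  if PySem.Set.contains S cand then some cand
  else if PySem.Chars.find cand ['.'] = -1 then none
  else pvAltGo S (cand.drop ((PySem.Chars.find cand ['.']).toNat + 1))
termination_by cand.length
decreasing_by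
  rename_i h2
  have hinf : ['.'] <:+: cand := by
    by_contra hcontra
    exact h2 ((PySem.Chars.find_eq_neg_one_iff _ _).mpr hcontra)
  have h1 : 1 ≤ cand.length := by simpa using hinf.length_le
  simp only [List.length_drop]
  omega

def best_geo_rule_match_py_alt (qname : String) (rules_dict : List (String × String)) : Option String :=
  let q := pvNorm qname
  let S := PySem.Set.ofList ((PySem.List.dedup (rules_dict.map (fun kv => kv.1))).map (fun k => pvNorm k))
  (pvAltGo S q).map (fun l => String.ofList l)

-- ===== PRECONDITION & SPEC =====
def Spec_best_geo_rule_match_py (qname : String) (rules_dict : List (String × String)) (out : Option String) : Prop := out = best_geo_rule_match_py_alt qname rules_dict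
instance (qname : String) (rules_dict : List (String × String)) (out : Option String) : Decidable (Spec_best_geo_rule_match_py qname rules_dict out) := by unfold Spec_best_geo_rule_match_py; infer_instance

-- ===== CLAIM (what is proved, stated in full; the proofs are below) =====
def Claim_equal_best_geo_rule_match_py : Prop := ∀ (qname : String) (rules_dict : List (String × String)), Dom_best_geo_rule_match_py qname rules_dict → Spec_best_geo_rule_match_py qname rules_dict (best_geo_rule_match_py qname rules_dict)

-- ===== LEMMAS AND PROOFS =====

-- suffixes of q that start right after a '.' of q
def pvTad : List Char → List (List Char)
  | [] => []
  | c :: t => (if c = '.' then [t] else []) ++ pvTad t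

-- q itself followed by those suffixes: exactly the strings kk with q == kk or q.endswith("." + kk)
def pvCands (q : List Char) : List (List Char) := q :: pvTad q

theorem pv_mem_tad (q kk : List Char) : kk ∈ pvTad q ↔ ('.' :: kk) <:+ q := by
  induction q with
  | nil => simp [pvTad]
  | cons c t ih =>
    rw [List.suffix_cons_iff]
    by_cases hc : c = '.'
    · subst hc
      have hT : pvTad ('.' :: t) = t :: pvTad t := by
        rw [pvTad, if_pos rfl, List.singleton_append]
      rw [hT, List.mem_cons, ih]
      constructor
      · rintro (rfl | h)
        · exact Or.inl rfl
        · exact Or.inr h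
      · rintro (h | h)
        · injection h with _ h2
          exact Or.inl h2
        · exact Or.inr h
    · have hT : pvTad (c :: t) = pvTad t := by
        rw [pvTad, if_neg hc, List.nil_append]
      rw [hT, ih]
      constructor
      · exact Or.inr
      · rintro (h | h)
        · injection h with h1 _
          exact absurd h1.symm hc
        · exact h

theorem pv_tad_len (q kk : List Char) (h : kk ∈ pvTad q) : kk.length < q.length := by
  have := ((pv_mem_tad q kk).mp h).length_le
  simpa using this

theorem pv_pairwise_tad (q : List Char) :
    (pvTad q).Pairwise (fun a b => b.length < a.length) := by
  induction q with
  | nil => simp [pvTad]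
  | cons c t ih =>
    by_cases hc : c = '.'
    · simp only [pvTad, hc, if_pos, List.singleton_append]
      exact List.Pairwise.cons (fun b hb => pv_tad_len t b hb) ih
    · simpa [pvTad, hc] using ih

theorem pv_pairwise_cands (q : List Char) :
    (pvCands q).Pairwise (fun a b => b.length < a.length) :=
  List.Pairwise.cons (fun b hb => pv_tad_len q b hb) (pv_pairwise_tad q)

theorem pv_mem_cands_iff (q kk : List Char) :
    (q == kk || PySem.Chars.endswith q ('.' :: kk)) = true ↔ kk ∈ pvCands q := by
  simp only [Bool.or_eq_true, beq_iff_eq, PySem.Chars.endswith_iff, pvCands, List.mem_cons,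
    pv_mem_tad]
  constructor
  · rintro (rfl | h)
    · exact Or.inl rfl
    · exact Or.inr h
  · rintro (rfl | h)
    · exact Or.inl rfl
    · exact Or.inr h

theorem pv_find?_congr {α : Type} (l : List α) (p q : α → Bool)
    (h : ∀ x ∈ l, p x = q x) : l.find? p = l.find? q := by
  induction l with
  | nil => rfl
  | cons a t ih =>
    have ha := h a (List.mem_cons_self ..)
    by_cases hp : p a = true
    · rw [List.find?_cons_of_pos hp, List.find?_cons_of_pos (ha ▸ hp)]
    · rw [List.find?_cons_of_neg hp, List.find?_cons_of_neg (by rw [← ha]; exact hp)]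
      exact ih (fun x hx => h x (List.mem_cons_of_mem _ hx))

theorem pv_find?_eq_some_of_max (l : List (List Char))
    (hl : l.Pairwise (fun a b => b.length < a.length)) (p : List Char → Bool)
    (c : List Char) (hc : c ∈ l) (hp : p c = true)
    (hmax : ∀ d ∈ l, p d = true → d.length ≤ c.length) : l.find? p = some c := by
  induction l with
  | nil => cases hc
  | cons a t ih =>
    rcases List.pairwise_cons.mp hl with ⟨ha, ht⟩
    by_cases hpa : p a = true
    · have hle : a.length ≤ c.length := hmax a (List.mem_cons_self ..) hpa
      have hca : c = a := by
        rcases List.mem_cons.mp hc with h | h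
        · exact h
        · exact absurd (ha c h) (by omega)
      rw [List.find?_cons_of_pos hpa, hca]
    · have hca : c ∈ t := by
        rcases List.mem_cons.mp hc with h | h
        · exact absurd hp (h ▸ hpa)
        · exact h
      rw [List.find?_cons_of_neg hpa]
      exact ih ht hca (fun d hd hpd => hmax d (List.mem_cons_of_mem _ hd) hpd)

theorem pv_max_of_find?_eq_some (l : List (List Char))
    (hl : l.Pairwise (fun a b => b.length < a.length)) (p : List Char → Bool)
    (c : List Char) (h : l.find? p = some c) :
    ∀ d ∈ l, p d = true → d.length ≤ c.length := by
  induction l with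
  | nil => cases h
  | cons a t ih =>
    rcases List.pairwise_cons.mp hl with ⟨ha, ht⟩
    by_cases hpa : p a = true
    · rw [List.find?_cons_of_pos hpa] at h
      obtain rfl : a = c := by injection h
      intro d hd _
      rcases List.mem_cons.mp hd with rfl | hdt
      · exact le_refl _
      · exact le_of_lt (ha d hdt)
    · rw [List.find?_cons_of_neg hpa] at h
      intro d hd hpd
      rcases List.mem_cons.mp hd with rfl | hdt
      · exact absurd hpd hpa
      · exact ih ht h d hdt hpd

-- A's loop over the (normalized) keys computes the longest candidate present among them
def pvBestC (q : List Char) (ns : List (List Char)) : Option (List Char) :=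
  (pvCands q).find? (fun c => decide (c ∈ ns))

def pvRepr (q : List Char) (ns : List (List Char)) : Option (List Char) × Int :=
  (pvBestC q ns, (pvBestC q ns).elim (-1) (fun c => (c.length : Int)))

theorem pv_foldA_eq (q : List Char) (ns : List (List Char)) :
    ns.foldl
      (fun (st : Option (List Char) × Int) kk =>
        if q == kk || PySem.Chars.endswith q ('.' :: kk) then
          if (kk.length : Int) > st.2 then (some kk, (kk.length : Int)) else st
        else st)
      (none, -1)
    = pvRepr q ns := by
  induction ns using List.reverseRecOn with
  | nil =>
    have h0 : pvBestC q [] = none := List.find?_eq_none.mpr (by simp)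
    simp only [List.foldl_nil, pvRepr, h0, Option.elim_none]
  | append_singleton ns kk ih =>
    simp only [List.foldl_append, List.foldl_cons, List.foldl_nil, ih]
    by_cases hm : kk ∈ pvCands q
    · have hcond : (q == kk || PySem.Chars.endswith q ('.' :: kk)) = true :=
        (pv_mem_cands_iff q kk).mpr hm
      rw [if_pos hcond]
      rcases hf : pvBestC q ns with _ | c1
      · have hnew : pvBestC q (ns ++ [kk]) = some kk := by
          have hnone := List.find?_eq_none.mp hf
          apply pv_find?_eq_some_of_max _ (pv_pairwise_cands q) _ kk hm (by simp)
          intro d hd hpd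
          rcases (by simpa using hpd : d ∈ ns ∨ d = kk) with h | rfl
          · exact absurd (by simpa using h) (hnone d hd)
          · exact le_refl _
        simp only [pvRepr, hf, hnew, Option.elim_none, Option.elim_some]
        rw [if_pos (by omega : ((kk.length : Int) > -1))]
      · have hc1m : c1 ∈ pvCands q := List.mem_of_find?_eq_some hf
        have hc1p : c1 ∈ ns := by simpa using List.find?_some hf
        have hmax1 := pv_max_of_find?_eq_some _ (pv_pairwise_cands q) _ c1 hf
        by_cases hlen : kk.length ≤ c1.length
        · have hnew : pvBestC q (ns ++ [kk]) = some c1 := by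
            apply pv_find?_eq_some_of_max _ (pv_pairwise_cands q) _ c1 hc1m (by simp [hc1p])
            intro d hd hpd
            rcases (by simpa using hpd : d ∈ ns ∨ d = kk) with h | rfl
            · exact hmax1 d hd (by simpa using h)
            · exact hlen
          simp only [pvRepr, hf, hnew, Option.elim_some]
          rw [if_neg (by omega : ¬((kk.length : Int) > (c1.length : Int)))]
        · have hnew : pvBestC q (ns ++ [kk]) = some kk := by
            apply pv_find?_eq_some_of_max _ (pv_pairwise_cands q) _ kk hm (by simp)
            intro d hd hpd
            rcases (by simpa using hpd : d ∈ ns ∨ d = kk) with h | rfl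
            · exact le_trans (hmax1 d hd (by simpa using h)) (by omega)
            · exact le_refl _
          simp only [pvRepr, hf, hnew, Option.elim_some]
          rw [if_pos (by omega : ((kk.length : Int) > (c1.length : Int)))]
    · have hcond : ¬((q == kk || PySem.Chars.endswith q ('.' :: kk)) = true) :=
        fun h => hm ((pv_mem_cands_iff q kk).mp h)
      rw [if_neg hcond]
      have hnew : pvBestC q (ns ++ [kk]) = pvBestC q ns := by
        apply pv_find?_congr
        intro x hx
        have hxk : x ≠ kk := fun h => hm (h ▸ hx)
        simp [hxk]
      simp only [pvRepr, hnew]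

theorem pv_infix_singleton (a : Char) (l : List Char) : [a] <:+: l ↔ a ∈ l := by
  constructor
  · rintro ⟨s, t, rfl⟩; simp
  · intro h
    rcases List.append_of_mem h with ⟨s, t, rfl⟩
    exact ⟨s, t, by simp⟩

theorem pv_tad_no_dot (cand : List Char) (h : '.' ∉ cand) : pvTad cand = [] := by
  induction cand with
  | nil => rfl
  | cons c t ih =>
    have hc : c ≠ '.' := fun hc => h (by simp [hc])
    have ht : '.' ∉ t := fun ht => h (List.mem_cons_of_mem _ ht)
    simp [pvTad, hc, ih ht]

theorem pv_tad_split (a b : List Char) (h : '.' ∉ a) :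
    pvTad (a ++ '.' :: b) = b :: pvTad b := by
  induction a with
  | nil => simp [pvTad]
  | cons c t ih =>
    have hc : c ≠ '.' := fun hc => h (by simp [hc])
    have ht : '.' ∉ t := fun ht => h (List.mem_cons_of_mem _ ht)
    simp [pvTad, hc, ih ht]

theorem pv_altGo_eq_aux (S : PySem.Set (List Char)) :
    ∀ (n : Nat) (cand : List Char), cand.length ≤ n →
      pvAltGo S cand = (pvCands cand).find? (fun c => PySem.Set.contains S c) := by
  intro n
  induction n with
  | zero =>
    intro cand hn
    have hcand : cand = [] := by
      cases cand with
      | nil => rfl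
      | cons a t => simp at hn
    subst hcand
    have hfind : PySem.Chars.find [] ['.'] = -1 :=
      (PySem.Chars.find_eq_neg_one_iff _ _).mpr (by simp)
    rw [pvAltGo]
    by_cases hc : PySem.Set.contains S [] = true
    · rw [if_pos hc]
      simp only [pvCands, pvTad]
      rw [List.find?_cons_of_pos hc]
    · rw [if_neg hc, if_pos hfind]
      simp only [pvCands, pvTad]
      rw [List.find?_cons_of_neg hc]
      rfl
  | succ n ih =>
    intro cand hn
    rw [pvAltGo]
    by_cases hc : PySem.Set.contains S cand = true
    · rw [if_pos hc]
      simp only [pvCands]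
      rw [List.find?_cons_of_pos hc]
    · rw [if_neg hc]
      by_cases hi : PySem.Chars.find cand ['.'] = -1
      · rw [if_pos hi]
        have hnd : '.' ∉ cand := by
          have := (PySem.Chars.find_eq_neg_one_iff cand ['.']).mp hi
          simpa [pv_infix_singleton] using this
        simp only [pvCands, pv_tad_no_dot cand hnd]
        rw [List.find?_cons_of_neg hc]
        rfl
      · rw [if_neg hi]
        have h0 : (0 : Int) ≤ PySem.Chars.find cand ['.'] := by
          have := PySem.Chars.neg_one_le_find cand ['.']
          omega
        obtain ⟨hpre, hmin⟩ := PySem.Chars.find_spec h0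
        set j : Nat := (PySem.Chars.find cand ['.']).toNat with hj
        have hjlt : j < cand.length := by
          by_contra hge
          have : cand.drop j = [] := List.drop_eq_nil_of_le (Nat.le_of_not_lt hge)
          rw [this] at hpre
          exact absurd (List.prefix_nil.mp hpre) (by simp)
        have hdj : cand.drop j = cand[j] :: cand.drop (j + 1) :=
          (List.getElem_cons_drop hjlt).symm
        have hjdot : cand[j] = '.' := by
          rw [hdj] at hpre
          rcases List.cons_prefix_cons.mp hpre with ⟨h1, _⟩
          exact h1.symm
        have hsplit : cand = cand.take j ++ '.' :: cand.drop (j + 1) := by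
          rw [← hjdot, ← hdj, List.take_append_drop]
        have hnd : '.' ∉ cand.take j := by
          intro hmem
          obtain ⟨i, hilen, hig⟩ := List.getElem_of_mem hmem
          have hij : i < j := lt_of_lt_of_le hilen (by simp)
          have higc : cand[i]'(lt_trans hij hjlt) = '.' := by
            rw [← hig]; exact (List.getElem_take).symm
          refine hmin i hij ?_
          rw [← List.getElem_cons_drop (lt_trans hij hjlt), higc]
          exact List.cons_prefix_cons.mpr ⟨rfl, List.nil_prefix⟩
        have hrec := ih (cand.drop (j + 1)) (by
          simp only [List.length_drop]
          omega)
        have htads : pvTad cand = cand.drop (j + 1) :: pvTad (cand.drop (j + 1)) := by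
          conv_lhs => rw [hsplit]
          exact pv_tad_split _ _ hnd
        rw [hrec]
        simp only [pvCands, htads]
        rw [List.find?_cons_of_neg hc]

theorem pv_altGo_eq (S : PySem.Set (List Char)) (cand : List Char) :
    pvAltGo S cand = (pvCands cand).find? (fun c => PySem.Set.contains S c) :=
  pv_altGo_eq_aux S cand.length cand (le_refl _)

theorem pv_contains_ofList (ns : List (List Char)) (c : List Char) :
    PySem.Set.contains (PySem.Set.ofList ns) c = decide (c ∈ ns) := by
  by_cases h : c ∈ ns <;> simp [h]

theorem pv_foldl_map_norm (q : List Char) (ks : List String) (init : Option (List Char) × Int) :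
    ks.foldl
      (fun (st : Option (List Char) × Int) k =>
        let kk := pvNorm k
        if q == kk || PySem.Chars.endswith q ('.' :: kk) then
          if (kk.length : Int) > st.2 then (some kk, (kk.length : Int)) else st
        else st)
      init
    = (ks.map (fun k => pvNorm k)).foldl
      (fun (st : Option (List Char) × Int) kk =>
        if q == kk || PySem.Chars.endswith q ('.' :: kk) then
          if (kk.length : Int) > st.2 then (some kk, (kk.length : Int)) else st
        else st)
      init := by
  induction ks generalizing init with
  | nil => rfl
  | cons a t ih =>
    simp only [List.foldl_cons, List.map_cons]
    exact ih _

theorem pv_main_eq (q : List Char) (ks : List String) :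
    (ks.foldl
      (fun (st : Option (List Char) × Int) k =>
        let kk := pvNorm k
        if q == kk || PySem.Chars.endswith q ('.' :: kk) then
          if (kk.length : Int) > st.2 then (some kk, (kk.length : Int)) else st
        else st)
      (none, -1)).1
    = pvAltGo (PySem.Set.ofList (ks.map (fun k => pvNorm k))) q := by
  rw [pv_foldl_map_norm, pv_foldA_eq, pv_altGo_eq,
    pv_find?_congr _ (fun c => PySem.Set.contains (PySem.Set.ofList (ks.map (fun k => pvNorm k))) c)
      (fun c => decide (c ∈ ks.map (fun k => pvNorm k)))
      (fun x _ => pv_contains_ofList _ x)]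
  rfl

-- ===== VERDICT (by name: the statement is the Claim_ definition above) =====
theorem best_geo_rule_match_py_spec : Claim_equal_best_geo_rule_match_py := by
  intro qname rules_dict _hDom
  unfold Spec_best_geo_rule_match_py
  exact congrArg (Option.map (fun l => String.ofList l))
    (pv_main_eq (pvNorm qname) (PySem.List.dedup (rules_dict.map (fun kv => kv.1))))
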